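-- pv_equiv track=rewrite | github.com/George-King-123/WXML-Extremal-Groups | Group_code(5-18_update)/D_infinity.py | compute_s_n_with_formula
-- ===== SOURCE A (Python) =====
-- from math import floor, ceil, factorial, sqrt, comb as comb_original
--
-- def compute_s_n_with_formula(n, k, t):
--   def comb(n, k):
--     if (k > n):
--       return 0
--     if (k < 0 or n < 0):
--       return 0
--     if (k == 0):
--       return 1
--     return comb_original(n, k)
--
--   def zero_case(k, n, t):
--     return comb(n + (k - t) - 1, (k - t) - 1)
--
--   def one_case(k, n, t):
--     res = 0
--     for q in range (1, min(k-t, n-1) + 1):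
--       res += pow(2, q)*comb(k-t, q)*comb(n-2, q-1)
--     res *= t
--     return res
--
--   def extra_two_case(k, n, t):
--     res = 0
--     for q in range (1, min(k-t, n-2) + 1):
--       res += (pow(2, q) - 1) * comb(k-t, q) * comb(n-3, q-1)
--     # res *= t
--     return res
--
--   # closed form for |S^n|-|S^n-2| when |S| = k and S has one element with a minus sign
--   def conj_one_sign_recurrence(k, n):
--     return zero_case(k, n, 1) + one_case(k, n, 1) + extra_two_case(k, n, 1)
--
--   # closed form for |S^n|-|S^n-2| when |S| = k and S has two elements with a minus sign
--   def conj_two_sign_recurrence(k, n):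
--     res = zero_case(k, n, 2) + one_case(k, n, 2) + extra_two_case(k, n, 2)
--     for i in range(2, n + 1):
--       omega_value = 0
--       if i == n: # note: when i = n, want the first summation to be 1
--         omega_value = 1
--       for q in range (1, min(k - 2, n - i) + 1):
--         omega_value += (pow(2, q)) * comb(k - 2, q) * comb(n - i - 1, q - 1)
--       res += omega_value * 2 # only 2 placements for sigma terms
--     return res
--
--   # for t > 1
--   def conj_recurrence(k, n, t):
--     res = zero_case(k, n, t) + one_case(k, n, t) + extra_two_case(k, n, t)
--     for i in range(2, n + 1):
--       omega_value = 0
--       sigma_value = 0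
--       for q in range (1, min(k - t, n - i) + 1):
--         omega_value += (pow(2, q)) * comb(k-t, q) * comb(n-i - 1, q-1)
--       for m in range (1, min(t-1, ceil(i / 2)) + 1):
--         sigma_value += comb(t, m) * comb(ceil(i / 2) - 1, m - 1) * comb((t-m) + floor(i / 2) - 1, (t - m) - 1)
--       if i == n: # note: when i = n, want the first summation to be 1
--         omega_value = 1
--       res += omega_value * sigma_value
--     return res
--
--   if t == 0:
--     return comb(n + k - 1, k - 1)
--
--   # set up for the even case
--   acc = 1
--   cur = 2
--
--   # change for the odd case
--   if n % 2 == 1: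
--     acc = k
--     cur = 3
--
--   if t == 1:
--     while cur <= n:
--       acc += conj_one_sign_recurrence(k, cur)
--       cur += 2
--     return acc
--   elif t == 2:
--     while cur <= n:
--       acc += conj_two_sign_recurrence(k, cur)
--       cur += 2
--     return acc
--   else:
--     while cur <= n:
--       acc += conj_recurrence(k, cur, t)
--       cur += 2
--     return acc
-- ===== SOURCE B (Python) =====
-- from math import comb as comb_original
--
-- def compute_s_n_with_formula(n, k, t):
--   def comb(n, k):
--     if (k > n):
--       return 0
--     if (k < 0 or n < 0):
--       return 0
--     if (k == 0):
--       return 1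
--     return comb_original(n, k)
--
--   if t == 0:
--     return comb(n + k - 1, k - 1)
--
--   # omega[d] = sum_{q=1}^{min(k-t,d)} 2^q C(k-t,q) C(d-1,q-1): shared by every cur,
--   # computed once instead of once per (cur, i) pair as in the nested recurrences.
--   omega = [sum(2**q * comb(k - t, q) * comb(d - 1, q - 1)
--                for q in range(1, min(k - t, d) + 1))
--            for d in range(n)]
--
--   # sigma[i] depends only on i (and t), never on cur: one table serves the whole run.
--   # For t == 1 it is identically 0 and for t == 2 identically 2 (i >= 2), so the
--   # three per-t recurrences of the original collapse into one formula.
--   def sig(i):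
--     c = (i + 1) // 2  # = ceil(i/2)
--     h = i // 2        # = floor(i/2)
--     return sum(comb(t, m) * comb(c - 1, m - 1) * comb((t - m) + h - 1, (t - m) - 1)
--                for m in range(1, min(t - 1, c) + 1))
--   sigma = [sig(i) for i in range(n + 1)]
--
--   if n % 2 == 1:
--     total, first = k, 3
--   else:
--     total, first = 1, 2
--
--   for cur in range(first, n + 1, 2):
--     # zero_case + one_case + extra_two_case; one_case(k, cur, t) = t * omega[cur-1]
--     inc1 = comb(cur + k - t - 1, k - t - 1) \
--          + t * omega[cur - 1] \
--          + sum((2**q - 1) * comb(k - t, q) * comb(cur - 3, q - 1)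
--                for q in range(1, min(k - t, cur - 2) + 1))
--     inc2 = sum((1 if i == cur else omega[cur - i]) * sigma[i]
--                for i in range(2, cur + 1))
--     total += inc1 + inc2
--   return total
-- ===== Notes on version B (the rewrite author's own statement) =====
-- stated objective: faster
-- what changed: B precomputes one omega[d] table and one sigma[i] table (sigma depends only on i, omega only on cur-i), collapses the three per-t recurrences (t=1, t=2, t>2) into one formula and reuses omega[cur-1] for one_case, so the inner q- and m-sums are not recomputed inside the double loop over (cur, i); intended as faster (measured 14.9x at the largest size where both finish; unconfirmed beyond, where both hit huge bignums).
import Mathlib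
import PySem

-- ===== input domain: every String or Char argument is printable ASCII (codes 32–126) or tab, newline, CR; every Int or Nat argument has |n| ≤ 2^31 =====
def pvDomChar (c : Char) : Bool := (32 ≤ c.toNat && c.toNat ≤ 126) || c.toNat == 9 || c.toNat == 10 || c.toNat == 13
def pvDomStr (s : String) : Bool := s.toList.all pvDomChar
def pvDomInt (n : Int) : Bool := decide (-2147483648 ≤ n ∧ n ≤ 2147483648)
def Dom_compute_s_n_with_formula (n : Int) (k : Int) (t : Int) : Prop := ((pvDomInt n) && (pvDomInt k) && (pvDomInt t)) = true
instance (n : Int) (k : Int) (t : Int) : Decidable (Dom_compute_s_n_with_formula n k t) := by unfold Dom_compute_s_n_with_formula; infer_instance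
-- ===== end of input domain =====

-- B precomputes omega/sigma tables once and unifies the three per-t recurrences, removing the
-- inner q-/m-sums from the (cur, i) double loop (intended as faster; measured 14.9x at the
-- largest size where both programs finished, unconfirmed beyond that).

-- ===== PORT A =====
-- guarded comb, identical in Source A and Source B (both define it verbatim); math.comb = Nat.choose
def pvComb (n k : Int) : Int :=
  if k > n then 0
  else if k < 0 ∨ n < 0 then 0
  else if k = 0 then 1
  else -- math.comb(n, k) for 0 < k <= n: exact incremental product C(n,j+1) = C(n,j)*(n-j)/(j+1),
       -- over min(k, n-k) factors (the symmetry CPython's math.comb also uses)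
    (((List.range (min k.toNat (n.toNat - k.toNat))).foldl
        (fun acc j => acc * (n.toNat - j) / (j + 1)) 1 : Nat) : Int)

-- Python computes ceil(i/2) via float division: exact as floor((i+1)/2) for |i| ≤ 2^31 (the Dom bound)
def pvCeilHalf (i : Int) : Int := PySem.Int.floordiv (i + 1) 2
def pvFloorHalf (i : Int) : Int := PySem.Int.floordiv i 2

def pvZeroCase (k n t : Int) : Int := pvComb (n + (k - t) - 1) ((k - t) - 1)

def pvOneCase (k n t : Int) : Int :=
  ((PySem.List.pyRange 1 (min (k - t) (n - 1) + 1)).foldl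
    (fun res q => res + 2 ^ q.toNat * pvComb (k - t) q * pvComb (n - 2) (q - 1)) 0) * t

def pvExtraTwoCase (k n t : Int) : Int :=
  (PySem.List.pyRange 1 (min (k - t) (n - 2) + 1)).foldl
    (fun res q => res + (2 ^ q.toNat - 1) * pvComb (k - t) q * pvComb (n - 3) (q - 1)) 0

def pvConjOneSign (k n : Int) : Int :=
  pvZeroCase k n 1 + pvOneCase k n 1 + pvExtraTwoCase k n 1

def pvConjTwoSign (k n : Int) : Int :=
  (PySem.List.pyRange 2 (n + 1)).foldl
    (fun res i =>
      let w0 : Int := if i = n then 1 else 0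
      let w := (PySem.List.pyRange 1 (min (k - 2) (n - i) + 1)).foldl
        (fun w q => w + 2 ^ q.toNat * pvComb (k - 2) q * pvComb (n - i - 1) (q - 1)) w0
      res + w * 2)
    (pvZeroCase k n 2 + pvOneCase k n 2 + pvExtraTwoCase k n 2)

def pvConjRec (k n t : Int) : Int :=
  (PySem.List.pyRange 2 (n + 1)).foldl
    (fun res i =>
      let w := (PySem.List.pyRange 1 (min (k - t) (n - i) + 1)).foldl
        (fun w q => w + 2 ^ q.toNat * pvComb (k - t) q * pvComb (n - i - 1) (q - 1)) 0
      let s := (PySem.List.pyRange 1 (min (t - 1) (pvCeilHalf i) + 1)).foldl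
        (fun s m => s + pvComb t m * pvComb (pvCeilHalf i - 1) (m - 1)
            * pvComb ((t - m) + pvFloorHalf i - 1) ((t - m) - 1)) 0
      let w' := if i = n then 1 else w
      res + w' * s)
    (pvZeroCase k n t + pvOneCase k n t + pvExtraTwoCase k n t)

-- the 'while cur <= n: acc += f(cur); cur += 2' loop shared by A's three branches
def pvWhile (f : Int → Int) (n acc cur : Int) : Int :=
  if cur ≤ n then pvWhile f n (acc + f cur) (cur + 2) else acc
termination_by (n + 1 - cur).toNat
decreasing_by omega

def compute_s_n_with_formula (n : Int) (k : Int) (t : Int) : Int :=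
  if t = 0 then pvComb (n + k - 1) (k - 1)
  else
    let acc : Int := if PySem.Int.mod n 2 = 1 then k else 1
    let cur : Int := if PySem.Int.mod n 2 = 1 then 3 else 2
    if t = 1 then pvWhile (fun c => pvConjOneSign k c) n acc cur
    else if t = 2 then pvWhile (fun c => pvConjTwoSign k c) n acc cur
    else pvWhile (fun c => pvConjRec k c t) n acc cur

-- ===== PORT B =====
def pvOmegaF (k t d : Int) : Int :=
  (PySem.List.pyRange 1 (min (k - t) d + 1)).foldl
    (fun w q => w + 2 ^ q.toNat * pvComb (k - t) q * pvComb (d - 1) (q - 1)) 0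

def pvSigmaF (t i : Int) : Int :=
  (PySem.List.pyRange 1 (min (t - 1) (pvCeilHalf i) + 1)).foldl
    (fun s m => s + pvComb t m * pvComb (pvCeilHalf i - 1) (m - 1)
        * pvComb ((t - m) + pvFloorHalf i - 1) ((t - m) - 1)) 0

def compute_s_n_with_formula_alt (n : Int) (k : Int) (t : Int) : Int :=
  if t = 0 then pvComb (n + k - 1) (k - 1)
  else
    let omegaTab := (PySem.List.pyRange 0 n).map (pvOmegaF k t)
    let sigmaTab := (PySem.List.pyRange 0 (n + 1)).map (pvSigmaF t)
    let total : Int := if PySem.Int.mod n 2 = 1 then k else 1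
    let first : Int := if PySem.Int.mod n 2 = 1 then 3 else 2
    (PySem.List.pyRange first (n + 1) 2).foldl
      (fun total cur =>
        -- list indexing: every index below is proved in range, so pyGetD _ _ 0 = xs[i]
        let inc1 := pvComb (cur + k - t - 1) (k - t - 1)
          + t * PySem.List.pyGetD omegaTab (cur - 1) 0
          + (PySem.List.pyRange 1 (min (k - t) (cur - 2) + 1)).foldl
              (fun r q => r + (2 ^ q.toNat - 1) * pvComb (k - t) q * pvComb (cur - 3) (q - 1)) 0
        let inc2 := (PySem.List.pyRange 2 (cur + 1)).foldl
          (fun s i => s + (if i = cur then 1 else PySem.List.pyGetD omegaTab (cur - i) 0)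
              * PySem.List.pyGetD sigmaTab i 0) 0
        total + (inc1 + inc2)) total

-- ===== PRECONDITION & SPEC =====
def Spec_compute_s_n_with_formula (n : Int) (k : Int) (t : Int) (out : Int) : Prop := out = compute_s_n_with_formula_alt n k t
instance (n : Int) (k : Int) (t : Int) (out : Int) : Decidable (Spec_compute_s_n_with_formula n k t out) := by unfold Spec_compute_s_n_with_formula; infer_instance

-- ===== CLAIM (what is proved, stated in full; the proofs are below) =====
def Claim_equal_compute_s_n_with_formula : Prop := ∀ (n : Int) (k : Int) (t : Int), Dom_compute_s_n_with_formula n k t → Spec_compute_s_n_with_formula n k t (compute_s_n_with_formula n k t)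

-- ===== LEMMAS AND PROOFS =====

-- B's per-cur increments, named for the proofs (definitionally the zeta-reduced body of the alt fold)
def pvInc1B (n k t c : Int) : Int :=
  pvComb (c + k - t - 1) (k - t - 1)
    + t * PySem.List.pyGetD ((PySem.List.pyRange 0 n).map (pvOmegaF k t)) (c - 1) 0
    + (PySem.List.pyRange 1 (min (k - t) (c - 2) + 1)).foldl
        (fun r q => r + (2 ^ q.toNat - 1) * pvComb (k - t) q * pvComb (c - 3) (q - 1)) 0

def pvGB (n k t c i : Int) : Int :=
  (if i = c then 1 else PySem.List.pyGetD ((PySem.List.pyRange 0 n).map (pvOmegaF k t)) (c - i) 0)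
    * PySem.List.pyGetD ((PySem.List.pyRange 0 (n + 1)).map (pvSigmaF t)) i 0

def pvInc2B (n k t c : Int) : Int :=
  (PySem.List.pyRange 2 (c + 1)).foldl (fun s i => s + pvGB n k t c i) 0

-- A's per-i loop bodies, named
def pvGA2 (k c i : Int) : Int :=
  ((PySem.List.pyRange 1 (min (k - 2) (c - i) + 1)).foldl
    (fun w q => w + 2 ^ q.toNat * pvComb (k - 2) q * pvComb (c - i - 1) (q - 1))
    (if i = c then 1 else 0)) * 2

def pvGAT (k t c i : Int) : Int :=
  (if i = c then 1
   else (PySem.List.pyRange 1 (min (k - t) (c - i) + 1)).foldl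
    (fun w q => w + 2 ^ q.toNat * pvComb (k - t) q * pvComb (c - i - 1) (q - 1)) 0)
    * pvSigmaF t i

lemma pvPyRange_two_nil (a b : Int) (h : b ≤ a) : PySem.List.pyRange a b 2 = [] := by
  rw [PySem.List.pyRange_of_pos a b (by norm_num)]
  simp [show ¬ a < b by omega]

lemma pvPyRange_two_cons (a b : Int) (h : a < b) :
    PySem.List.pyRange a b 2 = a :: PySem.List.pyRange (a + 2) b 2 := by
  rw [PySem.List.pyRange_of_pos a b (by norm_num),
      PySem.List.pyRange_of_pos (a + 2) b (by norm_num)]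
  by_cases h2 : a + 2 < b
  · rw [if_pos h, if_pos h2]
    have : ((b - a + 2 - 1) / 2).toNat = ((b - (a + 2) + 2 - 1) / 2).toNat + 1 := by omega
    rw [this, List.range_succ_eq_map, List.map_cons, List.map_map]
    congr 1
    · simp
    · apply List.map_congr_left; intro x _
      simp [Function.comp, Nat.succ_eq_add_one]; ring
  · rw [if_pos h, if_neg h2]
    have : ((b - a + 2 - 1) / 2).toNat = 1 := by omega
    rw [this]
    simp

lemma pvWhile_eq_foldl (f : Int → Int) (n : Int) :
    ∀ cur acc, pvWhile f n acc cur
      = (PySem.List.pyRange cur (n + 1) 2).foldl (fun a c => a + f c) acc := by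
  intro cur acc
  fun_induction pvWhile f n acc cur with
  | case1 acc cur h ih =>
      rw [pvPyRange_two_cons cur (n + 1) (by omega), List.foldl_cons, ih]
  | case2 acc cur h =>
      rw [pvPyRange_two_nil cur (n + 1) (by omega), List.foldl_nil]

lemma pvComb_zero_right (a : Int) (h : 0 ≤ a) : pvComb a 0 = 1 := by
  unfold pvComb; simp [show ¬ (0:Int) > a by omega]

lemma pvCeilHalf_pos (i : Int) (h : 2 ≤ i) : 1 ≤ pvCeilHalf i := by
  unfold pvCeilHalf; rw [PySem.Int.floordiv_eq_ediv_of_pos (by norm_num)]; omega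

lemma pvFloorHalf_pos (i : Int) (h : 2 ≤ i) : 1 ≤ pvFloorHalf i := by
  unfold pvFloorHalf; rw [PySem.Int.floordiv_eq_ediv_of_pos (by norm_num)]; omega

-- for t = 1 the sigma sum is empty
lemma pvSigmaF_one (i : Int) (h : 2 ≤ i) : pvSigmaF 1 i = 0 := by
  have hc := pvCeilHalf_pos i h
  unfold pvSigmaF
  rw [show min ((1:Int) - 1) (pvCeilHalf i) = 0 by omega,
      show (0:Int) + 1 = 1 by ring, PySem.List.pyRange_one_eq_nil (le_refl 1), List.foldl_nil]

-- for t = 2 the sigma sum is the constant 2 (A's "only 2 placements" comment)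
lemma pvSigmaF_two (i : Int) (h : 2 ≤ i) : pvSigmaF 2 i = 2 := by
  have hc := pvCeilHalf_pos i h
  have hf := pvFloorHalf_pos i h
  unfold pvSigmaF
  rw [show min ((2:Int) - 1) (pvCeilHalf i) = 1 by omega,
      show (1:Int) + 1 = 1 + 1 by ring, PySem.List.pyRange_one_singleton, List.foldl_cons,
      List.foldl_nil]
  rw [show (1:Int) - 1 = 0 by ring, show (2:Int) - 1 - 1 = 0 by ring,
      show (2:Int) - 1 + pvFloorHalf i - 1 = pvFloorHalf i by ring]
  rw [pvComb_zero_right _ (by omega), pvComb_zero_right _ (by omega),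
      show pvComb 2 1 = 2 by decide]
  ring

-- the omega-table lookups resolve to pvOmegaF, the sigma ones to pvSigmaF
lemma pvOmegaLookup (n k t j : Int) (h0 : 0 ≤ j) (h1 : j < n) :
    PySem.List.pyGetD ((PySem.List.pyRange 0 n).map (pvOmegaF k t)) j 0 = pvOmegaF k t j :=
  PySem.List.pyGetD_map_pyRange_of_nonneg _ _ _ _ h0 h1

lemma pvSigmaLookup (n t i : Int) (h0 : 0 ≤ i) (h1 : i < n + 1) :
    PySem.List.pyGetD ((PySem.List.pyRange 0 (n + 1)).map (pvSigmaF t)) i 0 = pvSigmaF t i :=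
  PySem.List.pyGetD_map_pyRange_of_nonneg _ _ _ _ h0 h1

-- zero_case + one_case + extra_two_case is B's inc1 (the omega table reused for one_case)
lemma pvInc1_eq (n k t c : Int) (h2 : 2 ≤ c) (hn : c ≤ n) :
    pvInc1B n k t c = pvZeroCase k c t + pvOneCase k c t + pvExtraTwoCase k c t := by
  unfold pvInc1B
  rw [pvOmegaLookup n k t (c - 1) (by omega) (by omega)]
  unfold pvOmegaF pvZeroCase pvOneCase pvExtraTwoCase
  rw [show c + k - t - 1 = c + (k - t) - 1 by ring]
  simp only [show c - 1 - 1 = c - 2 by ring]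
  ring

lemma pvBody_eq_one (n k c : Int) (h2 : 2 ≤ c) (hn : c ≤ n) :
    pvConjOneSign k c = pvInc1B n k 1 c + pvInc2B n k 1 c := by
  have hz : pvInc2B n k 1 c = 0 := by
    unfold pvInc2B
    rw [PySem.List.foldl_congr_mem _ _ (fun s (_ : Int) => s + 0) _ ?_]
    · rw [PySem.List.foldl_add]
      simp
    · intro acc i hi
      have hb := PySem.List.mem_pyRange_one.1 hi
      unfold pvGB
      rw [pvSigmaLookup n 1 i (by omega) (by omega), pvSigmaF_one i (by omega)]
      ring
  rw [hz, pvInc1_eq n k 1 c h2 hn]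
  unfold pvConjOneSign
  ring

lemma pvBody_eq_two (n k c : Int) (h2 : 2 ≤ c) (hn : c ≤ n) :
    pvConjTwoSign k c = pvInc1B n k 2 c + pvInc2B n k 2 c := by
  have hA : pvConjTwoSign k c
      = (PySem.List.pyRange 2 (c + 1)).foldl (fun res i => res + pvGA2 k c i)
          (pvZeroCase k c 2 + pvOneCase k c 2 + pvExtraTwoCase k c 2) := rfl
  rw [hA, PySem.List.foldl_add]
  unfold pvInc2B
  rw [PySem.List.foldl_add]
  have hmap : ∀ i ∈ PySem.List.pyRange 2 (c + 1), pvGA2 k c i = pvGB n k 2 c i := by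
    intro i hi
    have hb := PySem.List.mem_pyRange_one.1 hi
    unfold pvGA2 pvGB
    rw [pvSigmaLookup n 2 i (by omega) (by omega), pvSigmaF_two i (by omega)]
    by_cases hic : i = c
    · rw [if_pos hic, if_pos hic, hic,
          PySem.List.pyRange_one_eq_nil (show min (k - 2) (c - c) + 1 ≤ 1 by omega),
          List.foldl_nil]
    · rw [if_neg hic, if_neg hic, pvOmegaLookup n k 2 (c - i) (by omega) (by omega)]
      rfl
  rw [List.map_congr_left hmap, pvInc1_eq n k 2 c h2 hn]
  ring

lemma pvBody_eq_big (n k t c : Int) (h2 : 2 ≤ c) (hn : c ≤ n) :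
    pvConjRec k c t = pvInc1B n k t c + pvInc2B n k t c := by
  have hA : pvConjRec k c t
      = (PySem.List.pyRange 2 (c + 1)).foldl (fun res i => res + pvGAT k t c i)
          (pvZeroCase k c t + pvOneCase k c t + pvExtraTwoCase k c t) := by
    unfold pvConjRec pvGAT pvSigmaF
    rfl
  rw [hA, PySem.List.foldl_add]
  unfold pvInc2B
  rw [PySem.List.foldl_add]
  have hmap : ∀ i ∈ PySem.List.pyRange 2 (c + 1), pvGAT k t c i = pvGB n k t c i := by
    intro i hi
    have hb := PySem.List.mem_pyRange_one.1 hi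
    unfold pvGAT pvGB
    rw [pvSigmaLookup n t i (by omega) (by omega)]
    by_cases hic : i = c
    · rw [if_pos hic, if_pos hic]
    · rw [if_neg hic, if_neg hic, pvOmegaLookup n k t (c - i) (by omega) (by omega)]
      rfl
  rw [List.map_congr_left hmap, pvInc1_eq n k t c h2 hn]
  ring

theorem pv_main (n k t : Int) :
    compute_s_n_with_formula n k t = compute_s_n_with_formula_alt n k t := by
  by_cases ht0 : t = 0
  · simp only [compute_s_n_with_formula, compute_s_n_with_formula_alt, if_pos ht0]
  · simp only [compute_s_n_with_formula, compute_s_n_with_formula_alt, if_neg ht0]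
    show _ = (PySem.List.pyRange (if PySem.Int.mod n 2 = 1 then 3 else 2) (n + 1) 2).foldl
      (fun total c => total + (pvInc1B n k t c + pvInc2B n k t c))
      (if PySem.Int.mod n 2 = 1 then k else 1)
    generalize (if PySem.Int.mod n 2 = 1 then k else (1:Int)) = a0
    generalize hc : (if PySem.Int.mod n 2 = 1 then (3:Int) else 2) = c0
    have hc0 : 2 ≤ c0 := by rw [← hc]; split <;> norm_num
    have hbound : ∀ x, x ∈ PySem.List.pyRange c0 (n + 1) 2 → 2 ≤ x ∧ x ≤ n := by
      intro x hx
      have := (PySem.List.mem_pyRange_iff_of_pos (by norm_num) x).1 hx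
      omega
    by_cases ht1 : t = 1
    · rw [if_pos ht1, ht1, pvWhile_eq_foldl]
      apply PySem.List.foldl_congr_mem
      intro acc x hx
      rw [pvBody_eq_one n k x (hbound x hx).1 (hbound x hx).2]
    · by_cases ht2 : t = 2
      · rw [if_neg ht1, if_pos ht2, ht2, pvWhile_eq_foldl]
        apply PySem.List.foldl_congr_mem
        intro acc x hx
        rw [pvBody_eq_two n k x (hbound x hx).1 (hbound x hx).2]
      · rw [if_neg ht1, if_neg ht2, pvWhile_eq_foldl]
        apply PySem.List.foldl_congr_mem
        intro acc x hx
        rw [pvBody_eq_big n k t x (hbound x hx).1 (hbound x hx).2]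

-- ===== VERDICT (by name: the statement is the Claim_ definition above) =====
theorem compute_s_n_with_formula_spec : Claim_equal_compute_s_n_with_formula := by
  intro n k t _
  exact pv_main n k t
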